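-- pv_equiv track=rewrite | github.com/Lynxmat/ASD | Dynamiki/cw_2/Zaba.py | dinamics
-- ===== SOURCE A (Python) =====
-- def dinamics(arr):                   #jak chcemy jakiś warunek to można zrobić cnt i wyjść po osiągnięciu n-1 iteracji zewnętrznej
--     n = len(arr)
--     snacks = []
--     for i in range(n):
--         if arr[i]:
--             snacks.append((i,arr[i]))
--     m = len(snacks)                  #to samo co w rekurencji
--     curr_energy = snacks[0][1]
--     snacks[0] = (snacks[0][0],0)
--     stops = 1                        #najpierw bierzemy do curr_energy wartość obiadku z pierwszego elementu i czyścimy wartość obiadku w samej tablicy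
--     while curr_energy<n-1:           #czas na pętle która wykonuję się aż energia nie będzie większa od n-1
--         maks = 0
--         maks_ind = -1
--         for i in range(m):                          #szukanie będzie aż nie znajdziemy nie napotkamy zcegoś większego od curr_energy lub nie przejdziemy przez całość
--             if snacks[i][0]>curr_energy: break      #a celem jest maxymalny obiadek
--             if snacks[i][1] > maks:
--                 maks = snacks[i][1]
--                 maks_ind = i
--         curr_energy += maks
--         snacks[maks_ind]=(snacks[maks_ind][0],0)
--         stops+=1                                    #następnie robimy to samo co z pierwszym punktem dla maks_ind
--     return stops
-- ===== SOURCE B (Python) =====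
-- import heapq
--
-- def dinamics(arr):
--     n = len(arr)
--     snacks = [(i, v) for i, v in enumerate(arr) if v]
--     curr = snacks[0][1]
--     stops = 1
--     heap = []
--     j = 1
--     while curr < n - 1:
--         while j < len(snacks) and snacks[j][0] <= curr:
--             if snacks[j][1] > 0:
--                 heapq.heappush(heap, -snacks[j][1])
--             j += 1
--         curr -= heapq.heappop(heap)   # pop the largest reachable snack
--         stops += 1
--     return stops
-- ===== Notes on version B (the rewrite author's own statement) =====
-- stated objective: alternative
-- what changed: A rescans the whole snack list from the start at every stop to find the best reachable snack; B keeps a max-heap (heapq) of reachable snack values, pushing each snack once as the energy frontier passes it and popping the maximum at each stop (intended as faster; a timing run could not confirm it: random large inputs almost always leave A's loop non-terminating).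
-- outside the precondition, e.g. on dinamics([1, 0, 0]): A does not finish within the time limit, B raises IndexError; on dinamics([0, 0, 0]): A raises IndexError, B raises IndexError
import Mathlib
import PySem

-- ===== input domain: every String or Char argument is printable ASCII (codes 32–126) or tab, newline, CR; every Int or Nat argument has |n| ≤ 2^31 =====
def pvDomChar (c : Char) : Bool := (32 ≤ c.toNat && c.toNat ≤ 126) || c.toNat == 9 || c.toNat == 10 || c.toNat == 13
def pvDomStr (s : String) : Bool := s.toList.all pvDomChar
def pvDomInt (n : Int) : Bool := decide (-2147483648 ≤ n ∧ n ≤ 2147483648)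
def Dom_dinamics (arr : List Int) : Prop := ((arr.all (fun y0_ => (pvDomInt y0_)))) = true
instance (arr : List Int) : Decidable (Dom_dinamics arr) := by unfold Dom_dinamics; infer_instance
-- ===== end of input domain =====

-- B replaces A's full rescan of the snack list at every stop by a max-heap (heapq) holding the
-- values that have become reachable, popping the largest at each stop (alternative algorithm).

-- ===== PORT A =====

-- 'for i in range(n): if arr[i]: snacks.append((i, arr[i]))'
def buildSnacksA (arr : List Int) : List (Int × Int) :=
  (PySem.List.pyRange 0 (arr.length : Int) 1).foldl
    (fun acc i => if PySem.List.pyGetD arr i 0 ≠ 0 then acc ++ [(i, PySem.List.pyGetD arr i 0)] else acc) []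

-- the inner 'for i in range(m): if snacks[i][0]>curr: break; if snacks[i][1] > maks: …'
-- (k is the running value of i; returns the final (maks, maks_ind))
def scanA : List (Int × Int) → Int → Int → Int → Int → Int × Int
  | [], _, maks, ind, _ => (maks, ind)
  | q :: t, curr, maks, ind, k =>
    if q.1 > curr then (maks, ind)
    else if q.2 > maks then scanA t curr q.2 k (k + 1)
    else scanA t curr maks ind (k + 1)

-- 'snacks[maks_ind] = (snacks[maks_ind][0], 0)'; exact for -len ≤ ind < len (the only ind Python produces)
def zeroAt (snacks : List (Int × Int)) (ind : Int) : List (Int × Int) :=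
  let j : Int := if ind < 0 then ind + snacks.length else ind
  match snacks[j.toNat]? with
  | some p => snacks.set j.toNat (p.1, 0)
  | none => snacks

-- the 'while curr_energy < n-1' loop; the fuel m+1 exceeds the number of iterations on every
-- input where the Python loop terminates (each iteration zeroes one positive snack)
def loopA : Nat → List (Int × Int) → Int → Int → Int → Int
  | 0, _, _, _, stops => stops
  | fuel + 1, snacks, n, curr, stops =>
    if curr < n - 1 then
      let r := scanA snacks curr 0 (-1) 0
      loopA fuel (zeroAt snacks r.2) n (curr + r.1) (stops + 1)
    else stops

def dinamics (arr : List Int) : Int :=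
  let n : Int := arr.length
  let snacks := buildSnacksA arr
  match snacks with
  | [] => 0          -- Python raises IndexError on 'snacks[0]' here; excluded by Pre_
  | s0 :: restS => loopA (snacks.length + 1) ((s0.1, 0) :: restS) n s0.2 1

-- ===== PORT B =====

-- heapq.heappush on a min-heap of ints, modelled by its insertion into the sorted list of contents
def heapPush (heap : List Int) (x : Int) : List Int := List.orderedInsert (· ≤ ·) x heap

-- the inner 'while j < len(snacks) and snacks[j][0] <= curr: if snacks[j][1] > 0: heappush(heap, -snacks[j][1])'
def pushReach : List (Int × Int) → Int → List Int → List Int × List (Int × Int)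
  | [], _, heap => (heap, [])
  | q :: t, curr, heap =>
    if q.1 ≤ curr then pushReach t curr (if 0 < q.2 then heapPush heap (-q.2) else heap)
    else (heap, q :: t)

-- the 'while curr < n - 1' loop of B ('curr -= heappop(heap)'); same fuel bound as A's port
def loopB : Nat → List (Int × Int) → List Int → Int → Int → Int → Int
  | 0, _, _, _, _, stops => stops
  | fuel + 1, rest, heap, n, curr, stops =>
    if curr < n - 1 then
      let pr := pushReach rest curr heap
      match pr.1 with
      | [] => stops    -- Python raises IndexError in heappop here; excluded by Pre_
      | top :: t => loopB fuel pr.2 t n (curr - top) (stops + 1)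
    else stops

def dinamics_alt (arr : List Int) : Int :=
  let n : Int := arr.length
  let snacks := (PySem.List.enumerate arr).filter (fun p => p.2 ≠ 0)
  match snacks with
  | [] => 0          -- Python raises IndexError on 'snacks[0]' here; excluded by Pre_
  | s0 :: restS => loopB (snacks.length + 1) restS [] n s0.2 1

-- ===== PRECONDITION & SPEC =====

-- total value of the positive snacks other than the first nonzero one that sit at indices ≤ e
def pvPosSum (arr : List Int) (e : Int) : Int :=
  (((PySem.List.enumerate arr).filter
      (fun p => decide (p.1 ≠ (arr.findIdx (· ≠ 0) : Int)) && decide (p.1 ≤ e) && decide (0 < p.2))).map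
    Prod.snd).sum

-- Pre_ excludes exactly the inputs on which Python A does not return: arrays with no nonzero entry
-- (IndexError on snacks[0]) and arrays where the frog gets stuck before index n-1 (A's while loop
-- then runs forever); on such arrays there is an energy level e reachable at best (first value plus
-- every positive snack at index ≤ e) that is < n-1 and cannot be exceeded.
def Pre_dinamics (arr : List Int) : Prop :=
  arr.any (· ≠ 0) = true ∧
  (arr.getD (arr.findIdx (· ≠ 0)) 0 < 0 → (arr.length : Int) - 1 ≤ arr.getD (arr.findIdx (· ≠ 0)) 0) ∧
  ∀ e ∈ PySem.List.pyRange (max (arr.getD (arr.findIdx (· ≠ 0)) 0) 0) ((arr.length : Int) - 1) 1,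
    e < arr.getD (arr.findIdx (· ≠ 0)) 0 + pvPosSum arr e

instance (arr : List Int) : Decidable (Pre_dinamics arr) := by unfold Pre_dinamics; infer_instance

def pvWitness_dinamics : List Int := [2, 3, 0, 0, 1, 0]

def Spec_dinamics (arr : List Int) (out : Int) : Prop := out = dinamics_alt arr
instance (arr : List Int) (out : Int) : Decidable (Spec_dinamics arr out) := by unfold Spec_dinamics; infer_instance

-- ===== CLAIM (what is proved, stated in full; the proofs are below) =====
def Claim_equal_dinamics : Prop := ∀ (arr : List Int), Dom_dinamics arr → Pre_dinamics arr → Spec_dinamics arr (dinamics arr)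

-- ===== LEMMAS AND PROOFS =====

-- multiset of the positive snack values at indices ≤ e
def posv (l : List (Int × Int)) (e : Int) : Multiset Int :=
  ↑((l.filter (fun q => decide (q.1 ≤ e) && decide (0 < q.2))).map Prod.snd)

-- the positive snacks strictly beyond index e
def pfil (l : List (Int × Int)) (e : Int) : List (Int × Int) :=
  l.filter (fun q => decide (e < q.1) && decide (0 < q.2))

-- heap contents, negated back to snack values
def hv (heap : List Int) : Multiset Int := ↑(heap.map (fun x => -x))

-- the frog is never stuck: below n-1, taking every reachable positive snack overshoots
def SF (l : List (Int × Int)) (n curr : Int) : Prop :=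
  ∀ e : Int, curr ≤ e → e < n - 1 → e < curr + (posv l e).sum

def IdxSorted (l : List (Int × Int)) : Prop := l.Pairwise (fun p q => p.1 < q.1)

-- no-break version of A's inner scan, over the prefix the break admits
def scanFold : List (Int × Int) → Int → Int → Int → Int × Int
  | [], maks, ind, _ => (maks, ind)
  | q :: t, maks, ind, k =>
    if q.2 > maks then scanFold t q.2 k (k + 1) else scanFold t maks ind (k + 1)

lemma scanA_eq_scanFold (l : List (Int × Int)) (curr maks ind k : Int) :
    scanA l curr maks ind k = scanFold (l.takeWhile (fun q => decide (q.1 ≤ curr))) maks ind k := by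
  induction l generalizing maks ind k with
  | nil => rfl
  | cons q t ih =>
    by_cases h : q.1 ≤ curr
    · simp only [scanA, if_neg (not_lt.mpr h), List.takeWhile_cons, decide_eq_true h, if_pos trivial,
        scanFold]
      by_cases h2 : q.2 > maks
      · rw [if_pos h2, if_pos h2, ih]
      · rw [if_neg h2, if_neg h2, ih]
    · simp only [scanA, if_pos (not_le.mp h), List.takeWhile_cons, decide_eq_false h]
      simp [scanFold]

lemma scanFold_spec (a : List (Int × Int)) (maks ind k : Int) :
    (scanFold a maks ind k).1 = a.foldl (fun m q => max m q.2) maks ∧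
    ((scanFold a maks ind k).1 = maks ∧ (scanFold a maks ind k).2 = ind ∨
      ∃ j : Nat, ∃ hj : j < a.length, (scanFold a maks ind k).2 = k + j ∧
        a[j].2 = (scanFold a maks ind k).1) := by
  induction a generalizing maks ind k with
  | nil => exact ⟨rfl, Or.inl ⟨rfl, rfl⟩⟩
  | cons q t ih =>
    simp only [scanFold, List.foldl_cons]
    by_cases h : q.2 > maks
    · rw [if_pos h]
      obtain ⟨h1, h2⟩ := ih q.2 k (k + 1)
      refine ⟨by rw [h1]; congr 1; symm; exact max_eq_right (le_of_lt h), ?_⟩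
      rcases h2 with ⟨ha, hb⟩ | ⟨j, hj, hb, hc⟩
      · exact Or.inr ⟨0, by simp, by omega, by simpa using ha.symm⟩
      · exact Or.inr ⟨j + 1, by simpa using Nat.succ_lt_succ hj, by push_cast; omega,
          by simpa using hc⟩
    · rw [if_neg h]
      obtain ⟨h1, h2⟩ := ih maks ind (k + 1)
      refine ⟨by rw [h1]; congr 1; symm; exact max_eq_left (not_lt.mp h), ?_⟩
      rcases h2 with ⟨ha, hb⟩ | ⟨j, hj, hb, hc⟩
      · exact Or.inl ⟨ha, hb⟩
      · exact Or.inr ⟨j + 1, by simpa using Nat.succ_lt_succ hj, by push_cast; omega,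
          by simpa using hc⟩

lemma init_le_foldl_max (a : List (Int × Int)) (b : Int) : b ≤ a.foldl (fun m q => max m q.2) b := by
  induction a generalizing b with
  | nil => simp
  | cons q t ih => exact le_trans (le_max_left _ _) (ih (max b q.2))

lemma foldl_max_le (a : List (Int × Int)) (b : Int) (x : Int) (hx : x ∈ a.map Prod.snd ∨ x = b) :
    x ≤ a.foldl (fun m q => max m q.2) b := by
  induction a generalizing b with
  | nil => simp only [List.foldl_nil]; simp at hx; omega
  | cons q t ih =>
    simp only [List.foldl_cons]
    have hbase : max b q.2 ≤ t.foldl (fun m q => max m q.2) (max b q.2) :=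
      init_le_foldl_max t (max b q.2)
    rcases hx with hx | hx
    · simp only [List.map_cons, List.mem_cons] at hx
      rcases hx with hx | hx
      · exact le_trans (le_of_eq hx) (le_trans (le_max_right _ _) hbase)
      · exact ih _ (Or.inl hx)
    · exact le_trans (le_of_eq hx) (le_trans (le_max_left _ _) hbase)

lemma takeWhile_eq_filter_of_sorted (l : List (Int × Int)) (curr : Int) (h : IdxSorted l) :
    l.takeWhile (fun q => decide (q.1 ≤ curr)) = l.filter (fun q => decide (q.1 ≤ curr)) := by
  induction l with
  | nil => rfl
  | cons q t ih =>
    rw [IdxSorted, List.pairwise_cons] at h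
    obtain ⟨hq, ht⟩ := h
    by_cases hc : q.1 ≤ curr
    · simp only [List.takeWhile_cons, List.filter_cons, decide_eq_true hc, if_pos trivial,
        cond_true]
      rw [ih ht]
    · simp only [List.takeWhile_cons, List.filter_cons, decide_eq_false hc, cond_false]
      simp only [if_neg (by simp : ¬ (false = true))]
      symm
      rw [List.filter_eq_nil_iff]
      intro p hp
      simp only [decide_eq_true_eq]
      have := hq p hp
      omega

lemma dropWhile_eq_filter_of_sorted (l : List (Int × Int)) (curr : Int) (h : IdxSorted l) :
    l.dropWhile (fun q => decide (q.1 ≤ curr)) = l.filter (fun q => decide (curr < q.1)) := by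
  induction l with
  | nil => rfl
  | cons q t ih =>
    rw [IdxSorted, List.pairwise_cons] at h
    obtain ⟨hq, ht⟩ := h
    by_cases hc : q.1 ≤ curr
    · simp only [List.dropWhile_cons, decide_eq_true hc, List.filter_cons,
        decide_eq_false (not_lt.mpr hc), cond_false, if_pos trivial]
      exact ih ht
    · simp only [List.dropWhile_cons, decide_eq_false hc, List.filter_cons,
        decide_eq_true (not_le.mp hc), cond_true, if_neg (by simp : ¬ (false = true))]
      congr 1
      symm
      rw [List.filter_eq_self]
      intro p hp
      simp only [decide_eq_true_eq]
      have := hq p hp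
      omega

-- posv through a further index filter
lemma posv_filter_lt (l : List (Int × Int)) (c e : Int) :
    posv (l.filter (fun q => decide (c < q.1))) e = posv (pfil l c) e := by
  unfold posv pfil
  rw [List.filter_filter, List.filter_filter]
  congr 2
  apply List.filter_congr
  intro a _
  by_cases h1 : a.1 ≤ e <;> by_cases h2 : (0:Int) < a.2 <;> by_cases h3 : c < a.1 <;>
    simp [h1, h2, h3]

lemma posv_split (l : List (Int × Int)) (e e' : Int) (h : e ≤ e') :
    posv l e' = posv l e + posv (pfil l e) e' := by
  induction l with
  | nil => simp [posv, pfil]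
  | cons q t ih =>
    unfold posv pfil at ih ⊢
    simp only [List.filter_cons]
    by_cases h2 : (0:Int) < q.2
    · by_cases h1 : q.1 ≤ e
      · have h1' : q.1 ≤ e' := le_trans h1 h
        have h3 : ¬ e < q.1 := not_lt.mpr h1
        simp only [h1, h1', h2, h3, decide_true, decide_false, Bool.true_and, Bool.and_true,
          Bool.false_and, if_true, if_false, Bool.false_eq_true, List.map_cons,
          ← Multiset.cons_coe]
        rw [ih, Multiset.cons_add]
      · by_cases h1' : q.1 ≤ e'
        · have h3 : e < q.1 := not_le.mp h1
          simp only [h1, h1', h2, h3, decide_true, decide_false, Bool.true_and, Bool.and_true,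
            Bool.false_and, if_true, if_false, Bool.false_eq_true, List.filter_cons,
            List.map_cons, ← Multiset.cons_coe]
          rw [ih, Multiset.add_cons]
        · have h3 : e < q.1 := not_le.mp h1
          simp only [h1, h1', h2, h3, decide_true, decide_false, Bool.true_and, Bool.and_true,
            Bool.false_and, if_true, if_false, Bool.false_eq_true, List.filter_cons,
            List.map_cons]
          exact ih
    · simp only [h2, decide_false, Bool.and_false, if_false]
      exact ih

lemma pfil_pfil (l : List (Int × Int)) (e e' : Int) (h : e ≤ e') :
    pfil (pfil l e) e' = pfil l e' := by
  unfold pfil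
  rw [List.filter_filter]
  apply List.filter_congr
  intro a _
  by_cases h1 : e' < a.1 <;> by_cases h2 : (0:Int) < a.2 <;> by_cases h3 : e < a.1 <;>
    simp [h1, h2, h3] <;> omega

lemma pfil_filter_lt (l : List (Int × Int)) (c e : Int) (h : c ≤ e) :
    pfil (l.filter (fun q => decide (c < q.1))) e = pfil l e := by
  unfold pfil
  rw [List.filter_filter]
  apply List.filter_congr
  intro a _
  by_cases h1 : e < a.1 <;> by_cases h2 : (0:Int) < a.2 <;> by_cases h3 : c < a.1 <;>
    simp [h1, h2, h3] <;> omega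

lemma mem_posv {l : List (Int × Int)} {e x : Int} :
    x ∈ posv l e ↔ ∃ q ∈ l, q.1 ≤ e ∧ 0 < q.2 ∧ q.2 = x := by
  unfold posv
  simp only [Multiset.mem_coe, List.mem_map, List.mem_filter, Bool.and_eq_true,
    decide_eq_true_eq]
  constructor
  · rintro ⟨q, ⟨hq, h1, h2⟩, h3⟩
    exact ⟨q, hq, h1, h2, h3⟩
  · rintro ⟨q, hq, h1, h2, h3⟩
    exact ⟨q, ⟨hq, h1, h2⟩, h3⟩

lemma posv_append (u v : List (Int × Int)) (e : Int) :
    posv (u ++ v) e = posv u e + posv v e := by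
  unfold posv
  rw [List.filter_append, List.map_append]
  simp

-- A's zeroing step
lemma zero_step (snA : List (Int × Int)) (curr : Int) (hs : IdxSorted snA)
    (hpos : posv snA curr ≠ 0) :
    0 < (scanA snA curr 0 (-1) 0).1 ∧
    (scanA snA curr 0 (-1) 0).1 ∈ posv snA curr ∧
    (∀ x ∈ posv snA curr, x ≤ (scanA snA curr 0 (-1) 0).1) ∧
    IdxSorted (zeroAt snA (scanA snA curr 0 (-1) 0).2) ∧
    (∀ e : Int, curr ≤ e →
      posv (zeroAt snA (scanA snA curr 0 (-1) 0).2) e = (posv snA e).erase (scanA snA curr 0 (-1) 0).1) ∧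
    (∀ e : Int, curr ≤ e →
      pfil (zeroAt snA (scanA snA curr 0 (-1) 0).2) e = pfil snA e) := by
  have hTF : snA.takeWhile (fun q => decide (q.1 ≤ curr))
      = snA.filter (fun q => decide (q.1 ≤ curr)) :=
    takeWhile_eq_filter_of_sorted _ _ hs
  set a := snA.takeWhile (fun q => decide (q.1 ≤ curr)) with ha
  have hscan : scanA snA curr 0 (-1) 0 = scanFold a 0 (-1) 0 := scanA_eq_scanFold _ _ _ _ _
  obtain ⟨h1, h2⟩ := scanFold_spec a 0 (-1) 0
  have hposv : posv snA curr = ↑((a.filter (fun q => decide (0 < q.2))).map Prod.snd) := by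
    unfold posv
    rw [hTF, List.filter_filter]
    refine congrArg _ (congrArg _ ?_)
    apply List.filter_congr
    intro q _
    by_cases hq1 : q.1 ≤ curr <;> by_cases hq2 : (0:Int) < q.2 <;> simp [hq1, hq2]
  set maks := (scanFold a 0 (-1) 0).1 with hmk
  have hub : ∀ x ∈ posv snA curr, x ≤ maks := by
    intro x hx
    rw [hposv] at hx
    simp only [Multiset.mem_coe, List.mem_map, List.mem_filter] at hx
    obtain ⟨q, ⟨hq, _⟩, hqx⟩ := hx
    rw [h1]
    exact foldl_max_le a 0 x (Or.inl (hqx ▸ List.mem_map_of_mem hq))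
  have hmpos : 0 < maks := by
    obtain ⟨x, hx⟩ := Multiset.exists_mem_of_ne_zero hpos
    have hxpos : 0 < x := by
      rw [mem_posv] at hx
      obtain ⟨q, _, _, hq2, hq3⟩ := hx
      omega
    exact lt_of_lt_of_le hxpos (hub x hx)
  rcases h2 with ⟨hz, _⟩ | ⟨j, hj, hb, hcq⟩
  · omega
  · have hpre : a <+: snA := by
      rw [ha]
      exact List.takeWhile_prefix _
    have hjA : j < snA.length := lt_of_lt_of_le hj hpre.length_le
    have hgetj : a[j] = snA[j]'hjA := hpre.getElem hj
    have hjle : (a[j]).1 ≤ curr := by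
      have hmem : a[j] ∈ a := List.getElem_mem hj
      have := List.mem_takeWhile_imp hmem
      simpa using this
    have hzero : zeroAt snA (scanFold a 0 (-1) 0).2 = snA.set j ((a[j]).1, 0) := by
      unfold zeroAt
      rw [hb]
      simp only [show ¬ ((0:Int) + (j:Int) < 0) by omega, if_false]
      have : ((0:Int) + (j:Int)).toNat = j := by omega
      rw [this, List.getElem?_eq_getElem hjA, ← hgetj]
    have hdec : snA = snA.take j ++ a[j] :: snA.drop (j + 1) := by
      conv_lhs => rw [← List.take_append_drop j snA]
      rw [List.drop_eq_getElem_cons hjA, hgetj]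
    have hset : snA.set j ((a[j]).1, 0) = snA.take j ++ ((a[j]).1, 0) :: snA.drop (j + 1) := by
      rw [List.set_eq_take_append_cons_drop, if_pos hjA]
    rw [hscan]
    refine ⟨hmpos, ?_, hub, ?_, ?_, ?_⟩
    · rw [mem_posv]
      refine ⟨a[j], hpre.sublist.mem (List.getElem_mem hj), hjle, ?_, hcq⟩
      rw [hcq]; exact hmpos
    · rw [hzero, hset]
      rw [IdxSorted] at hs ⊢
      rw [hdec, List.pairwise_append, List.pairwise_cons] at hs
      rw [List.pairwise_append, List.pairwise_cons]
      obtain ⟨p1, ⟨p2, p3⟩, p4⟩ := hs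
      refine ⟨p1, ⟨fun b hb => p2 b hb, p3⟩, ?_⟩
      intro x hx y hy
      rcases List.mem_cons.mp hy with hy | hy
      · subst hy
        exact p4 x hx a[j] List.mem_cons_self
      · exact p4 x hx y (List.mem_cons_of_mem _ hy)
    · intro e he
      rw [hzero, hset]
      conv_rhs => rw [hdec]
      rw [posv_append, posv_append]
      have hje : (a[j]).1 ≤ e := le_trans hjle he
      have hcons1 : posv (((a[j]).1, 0) :: snA.drop (j + 1)) e = posv (snA.drop (j + 1)) e := by
        unfold posv
        simp [List.filter_cons]
      have hcons2 : posv (a[j] :: snA.drop (j + 1)) e = maks ::ₘ posv (snA.drop (j + 1)) e := by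
        unfold posv
        rw [List.filter_cons]
        simp only [decide_eq_true hje, decide_eq_true (hcq ▸ hmpos), Bool.and_self, if_pos trivial,
          List.map_cons, ← Multiset.cons_coe]
        rw [hcq]
      rw [hcons1, hcons2]
      rw [show posv (snA.take j) e + (maks ::ₘ posv (snA.drop (j+1)) e)
            = maks ::ₘ (posv (snA.take j) e + posv (snA.drop (j+1)) e) from
          (Multiset.add_cons _ _ _), Multiset.erase_cons_head]
    · intro e he
      rw [hzero, hset]
      conv_rhs => rw [hdec]
      unfold pfil
      rw [List.filter_append, List.filter_append, List.filter_cons, List.filter_cons]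
      have hje : ¬ e < (a[j]).1 := not_lt.mpr (le_trans hjle he)
      simp [hje]

-- B's push step
lemma pushReach_spec (rest : List (Int × Int)) (curr : Int) (heap : List Int)
    (hr : IdxSorted rest) (hs : List.Pairwise (· ≤ ·) heap) (hneg : ∀ x ∈ heap, x < 0) :
    hv (pushReach rest curr heap).1 = hv heap + posv rest curr ∧
    (pushReach rest curr heap).2 = rest.dropWhile (fun q => decide (q.1 ≤ curr)) ∧
    List.Pairwise (· ≤ ·) (pushReach rest curr heap).1 ∧
    (∀ x ∈ (pushReach rest curr heap).1, x < 0) := by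
  induction rest generalizing heap with
  | nil => exact ⟨by simp [pushReach, posv, hv], rfl, hs, hneg⟩
  | cons q t ih =>
    rw [IdxSorted, List.pairwise_cons] at hr
    obtain ⟨hq, ht⟩ := hr
    by_cases hc : q.1 ≤ curr
    · simp only [pushReach, if_pos hc]
      by_cases hp : (0:Int) < q.2
      · rw [if_pos hp]
        have hperm : (heapPush heap (-q.2)).Perm (-q.2 :: heap) :=
          List.perm_orderedInsert _ _ _
        have hhv : hv (heapPush heap (-q.2)) = q.2 ::ₘ hv heap := by
          unfold hv
          rw [Multiset.coe_eq_coe.mpr (hperm.map _)]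
          simp [Multiset.cons_coe]
        have hs' : List.Pairwise (· ≤ ·) (heapPush heap (-q.2)) :=
          List.Pairwise.orderedInsert _ _ hs
        have hneg' : ∀ x ∈ heapPush heap (-q.2), x < 0 := by
          intro x hx
          rcases List.mem_cons.mp ((hperm.mem_iff).mp hx) with hx' | hx'
          · omega
          · exact hneg x hx'
        obtain ⟨i1, i2, i3, i4⟩ := ih (heapPush heap (-q.2)) ht hs' hneg'
        refine ⟨?_, ?_, i3, i4⟩
        · rw [i1, hhv]
          unfold posv
          simp only [List.filter_cons, decide_eq_true hc, decide_eq_true hp, Bool.and_self,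
            if_pos trivial, Bool.true_and, List.map_cons, ← Multiset.cons_coe]
          rw [Multiset.cons_add, Multiset.add_cons]
        · rw [i2, List.dropWhile_cons, if_pos (by simpa using hc)]
      · rw [if_neg hp]
        obtain ⟨i1, i2, i3, i4⟩ := ih heap ht hs hneg
        refine ⟨?_, ?_, i3, i4⟩
        · rw [i1]
          unfold posv
          simp only [List.filter_cons, decide_eq_true hc, decide_eq_false hp, Bool.true_and,
            Bool.and_false, Bool.false_eq_true, if_false]
        · rw [i2, List.dropWhile_cons, if_pos (by simpa using hc)]
    · simp only [pushReach, if_neg hc]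
      have hnil : (q :: t).filter (fun p => decide (p.1 ≤ curr) && decide (0 < p.2)) = [] := by
        rw [List.filter_eq_nil_iff]
        intro p hp
        rcases List.mem_cons.mp hp with h | h
        · subst h; simp [hc]
        · have := hq p h
          simp only [Bool.and_eq_true, decide_eq_true_eq, not_and]
          omega
      refine ⟨by unfold posv; rw [hnil]; simp, ?_, hs, hneg⟩
      rw [List.dropWhile_cons, if_neg (by simpa using hc)]

-- the main lockstep invariant: one iteration of A corresponds to one pop of B
lemma lockstep (fuel : Nat) (snA rest : List (Int × Int)) (heap : List Int) (n curr stops : Int)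
    (hA : IdxSorted snA) (hR : IdxSorted rest)
    (hI1 : hv heap + posv rest curr = posv snA curr)
    (hI2 : pfil snA curr = pfil rest curr)
    (hs : List.Pairwise (· ≤ ·) heap) (hneg : ∀ x ∈ heap, x < 0)
    (hSF : SF snA n curr) :
    loopA fuel snA n curr stops = loopB fuel rest heap n curr stops := by
  induction fuel generalizing snA rest heap curr stops with
  | zero => rfl
  | succ fuel ih =>
    by_cases hc : curr < n - 1
    · simp only [loopA, loopB, if_pos hc]
      have hsum : 0 < (posv snA curr).sum := by
        have := hSF curr le_rfl hc
        omega
      have hne : posv snA curr ≠ 0 := by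
        intro h0
        rw [h0] at hsum
        simp at hsum
      obtain ⟨hmpos, hmmem, hub, hsort', hposv', hpfil'⟩ := zero_step snA curr hA hne
      obtain ⟨b1, b2, b3, b4⟩ := pushReach_spec rest curr heap hR hs hneg
      have hhv : hv (pushReach rest curr heap).1 = posv snA curr := by rw [b1, hI1]
      have hnonnil : (pushReach rest curr heap).1 ≠ [] := by
        intro h0
        rw [h0] at hhv
        exact hne (by simpa [hv] using hhv.symm)
      obtain ⟨top, t, hheq⟩ := List.exists_cons_of_ne_nil hnonnil
      rw [hheq]
      have hhv2 : posv snA curr = (-top) ::ₘ hv t := by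
        rw [← hhv, hheq]
        unfold hv
        rw [List.map_cons, ← Multiset.cons_coe]
      have hsort2 : List.Pairwise (· ≤ ·) (top :: t) := hheq ▸ b3
      have hneg2 : ∀ x ∈ top :: t, x < 0 := fun x hx => b4 x (hheq ▸ hx)
      obtain ⟨htople, hsortt⟩ := List.pairwise_cons.mp hsort2
      set maks := (scanA snA curr 0 (-1) 0).1 with hmk
      have htop : -top = maks := by
        have h1 : -top ≤ maks := hub _ (hhv2 ▸ Multiset.mem_cons_self _ _)
        have h2 : maks ≤ -top := by
          have : maks ∈ (-top) ::ₘ hv t := hhv2 ▸ hmmem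
          rcases Multiset.mem_cons.mp this with h | h
          · omega
          · simp only [hv, Multiset.mem_coe, List.mem_map] at h
            obtain ⟨y, hy, hym⟩ := h
            have := htople y hy
            omega
        omega
      have hstep : curr - top = curr + maks := by omega
      show loopA fuel (zeroAt snA (scanA snA curr 0 (-1) 0).2) n
          (curr + (scanA snA curr 0 (-1) 0).1) (stops + 1)
        = loopB fuel (pushReach rest curr heap).2 t n (curr - top) (stops + 1)
      rw [hstep]
      have hcc : curr ≤ curr + maks := by omega
      have hrest' : (pushReach rest curr heap).2 = rest.filter (fun q => decide (curr < q.1)) := by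
        rw [b2, dropWhile_eq_filter_of_sorted _ _ hR]
      apply ih
      · exact hsort'
      · rw [hrest']
        exact List.Pairwise.filter _ hR
      · rw [hposv' _ hcc, posv_split snA curr (curr + maks) hcc,
          Multiset.erase_add_left_pos _ hmmem, hhv2, htop, Multiset.erase_cons_head,
          hrest', posv_filter_lt, hI2]
      · rw [hpfil' _ hcc, hrest', pfil_filter_lt _ _ _ hcc, ← pfil_pfil snA curr (curr + maks) hcc,
          hI2, pfil_pfil rest curr (curr + maks) hcc]
      · exact hsortt
      · exact fun x hx => hneg2 x (List.mem_cons_of_mem _ hx)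
      · intro e he1 he2
        have heC : curr ≤ e := le_trans hcc he1
        rw [hposv' e heC]
        have hm_in : maks ∈ posv snA e := by
          rw [posv_split snA curr e heC]
          exact Multiset.mem_add.mpr (Or.inl hmmem)
        have hsum2 := Multiset.sum_erase hm_in
        have := hSF e heC he2
        omega
    · simp only [loopA, loopB, if_neg hc]

-- bridge: A's snack-building loop builds the same list as B's comprehension
lemma buildSnacksA_eq (arr : List Int) :
    buildSnacksA arr = (PySem.List.enumerate arr).filter (fun p => p.2 ≠ 0) := by
  unfold buildSnacksA
  rw [PySem.List.foldl_append_ite (fun i => PySem.List.pyGetD arr i 0 ≠ 0)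
      (fun i => (i, PySem.List.pyGetD arr i 0)),
    PySem.List.enumerate_eq_map_pyRange arr 0, List.filter_map, List.nil_append]
  rfl

lemma snacks_sorted (arr : List Int) :
    IdxSorted ((PySem.List.enumerate arr).filter (fun p => p.2 ≠ 0)) := by
  exact List.Pairwise.filter _ (PySem.List.pairwise_lt_enumerate arr 0)

lemma filter_filter_of_imp {α : Type} (l : List α) (C D : α → Bool)
    (h : ∀ p, C p = true → D p = true) : l.filter C = (l.filter D).filter C := by
  rw [List.filter_filter]
  apply List.filter_congr
  intro a _
  cases hC : C a
  · simp
  · simp [h a hC]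

-- the head of the snack list is the first nonzero entry of arr
lemma snacks_head_aux (arr : List Int) (s : Int) (s0 : Int × Int) (restS : List (Int × Int))
    (h : (PySem.List.enumerate arr s).filter (fun p => p.2 ≠ 0) = s0 :: restS) :
    s0 = (s + (arr.findIdx (· ≠ 0) : Int), arr.getD (arr.findIdx (· ≠ 0)) 0) := by
  induction arr generalizing s s0 restS with
  | nil => simp [PySem.List.enumerate] at h
  | cons x t ih =>
    rw [PySem.List.enumerate_cons, List.filter_cons] at h
    by_cases hx : x ≠ 0
    · simp only [decide_eq_true hx, if_pos trivial, List.cons.injEq] at h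
      rw [List.findIdx_cons]
      simp only [decide_eq_true hx, cond_true, Nat.cast_zero, add_zero, List.getD_cons_zero]
      exact h.1.symm
    · simp only [decide_eq_false hx, Bool.false_eq_true, if_false] at h
      have := ih (s + 1) s0 restS h
      rw [List.findIdx_cons]
      simp only [decide_eq_false hx, cond_false, List.getD_cons_succ]
      rw [this]
      congr 1
      push_cast
      ring

lemma snacks_head (arr : List Int) (s0 : Int × Int) (restS : List (Int × Int))
    (h : (PySem.List.enumerate arr).filter (fun p => p.2 ≠ 0) = s0 :: restS) :
    s0 = ((arr.findIdx (· ≠ 0) : Int), arr.getD (arr.findIdx (· ≠ 0)) 0) := by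
  have := snacks_head_aux arr 0 s0 restS h
  simpa using this

-- Pre_'s sum is the sum of the reachable positive snacks once the head is zeroed
lemma pvPosSum_eq (arr : List Int) (s0 : Int × Int) (restS : List (Int × Int))
    (h : (PySem.List.enumerate arr).filter (fun p => p.2 ≠ 0) = s0 :: restS) (e : Int) :
    pvPosSum arr e = (posv ((s0.1, 0) :: restS) e).sum := by
  have hh := snacks_head arr s0 restS h
  have hsorted := snacks_sorted arr
  rw [h, IdxSorted, List.pairwise_cons] at hsorted
  obtain ⟨hgt, _⟩ := hsorted
  unfold pvPosSum
  rw [filter_filter_of_imp (PySem.List.enumerate arr) _ (fun p => decide (p.2 ≠ 0))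
    (by
      intro p hp
      simp only [Bool.and_eq_true, decide_eq_true_eq] at hp ⊢
      omega)]
  rw [h, List.filter_cons]
  have hs01 : s0.1 = ((arr.findIdx (· ≠ 0) : Nat) : Int) := by rw [hh]
  simp only [hs01, ne_eq, not_true_eq_false, decide_false, Bool.false_and, Bool.false_eq_true,
    if_false]
  have hfc : restS.filter
      (fun p => decide (p.1 ≠ ((arr.findIdx (· ≠ 0) : Nat) : Int)) && decide (p.1 ≤ e)
        && decide (0 < p.2))
      = restS.filter (fun q => decide (q.1 ≤ e) && decide (0 < q.2)) := by
    apply List.filter_congr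
    intro p hp
    have hlt := hgt p hp
    rw [hs01] at hlt
    have hne : p.1 ≠ ((arr.findIdx (· ≠ 0) : Nat) : Int) := by omega
    simp only [decide_eq_true hne, Bool.true_and]
  rw [hfc]
  unfold posv
  rw [List.filter_cons]
  simp only [decide_eq_true_eq, lt_self_iff_false, decide_false, Bool.and_false,
    Bool.false_eq_true, if_false]
  exact (Multiset.sum_coe _).symm

-- ===== VERDICT (by name: the statement is the Claim_ definition above) =====
theorem dinamics_spec : Claim_equal_dinamics := by
  unfold Claim_equal_dinamics
  intro arr _ hpre
  unfold Spec_dinamics dinamics dinamics_alt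
  simp only [buildSnacksA_eq]
  cases h : (PySem.List.enumerate arr).filter (fun p => p.2 ≠ 0) with
  | nil => rfl
  | cons s0 restS =>
    simp only []
    have hsorted := snacks_sorted arr
    rw [h, IdxSorted, List.pairwise_cons] at hsorted
    obtain ⟨hgt, hrest⟩ := hsorted
    apply lockstep
    · rw [IdxSorted, List.pairwise_cons]
      exact ⟨fun b hb => hgt b hb, hrest⟩
    · exact hrest
    · unfold hv posv
      rw [List.filter_cons]
      simp
    · unfold pfil
      rw [List.filter_cons]
      simp
    · exact List.Pairwise.nil
    · intro x hx
      simp at hx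
    · intro e he1 he2
      have hh := snacks_head arr s0 restS h
      have hv0 : arr.getD (arr.findIdx (· ≠ 0)) 0 = s0.2 := by rw [hh]
      by_cases hneg0 : arr.getD (arr.findIdx (· ≠ 0)) 0 < 0
      · have := hpre.2.1 hneg0
        rw [hv0] at this
        omega
      · have := hpre.2.2 e (by
          rw [PySem.List.mem_pyRange_one, max_eq_left (not_lt.mp hneg0), hv0]
          exact ⟨he1, by omega⟩)
        rw [hv0, pvPosSum_eq arr s0 restS h e] at this
        omega
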